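-- pv_equiv track=rewrite | github.com/DobbiKov/translate-dir-lib | trans_lib/helpers.py | divide_into_chunks
-- ===== SOURCE A (Python) =====
-- from typing import List, Optional, Iterable
--
-- def divide_into_chunks(text: str, lines_per_chunk: int) -> List[str]:
--     """
--     Takes a text, divides it into chunks (each chunk containing at most
--     `lines_per_chunk` number of lines) and returns the list of such chunks.
--     """
--     if not text or lines_per_chunk <= 0:
--         return [text] if text else []
--
--     lines = text.splitlines(keepends=True) # keepends=True to preserve newline chars
--     if not lines: # Handle empty string or string with no newlines if splitlines returns empty
--         return [text] if text.strip() else []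
--
--
--     chunks: List[str] = []
--     current_chunk_lines: List[str] = []
--
--     for i, line in enumerate(lines):
--         current_chunk_lines.append(line)
--         if (i + 1) % lines_per_chunk == 0:
--             chunks.append("".join(current_chunk_lines))
--             current_chunk_lines = []
--
--     if current_chunk_lines:
--         chunks.append("".join(current_chunk_lines))
--
--     # If original text had no newlines but lines_per_chunk > 0
--     if not chunks and text:
--         return [text]
--
--     return chunks
-- ===== SOURCE B (Python) =====
-- def divide_into_chunks(text, lines_per_chunk):
--     if not text or lines_per_chunk <= 0:
--         return [text] if text else []
--     chunks = []
--     buf = []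
--     count = 0
--     i = 0
--     n = len(text)
--     while i < n:
--         c = text[i]
--         if c == '\r':
--             if i + 1 < n and text[i + 1] == '\n':
--                 buf.append('\r\n')
--                 i += 2
--             else:
--                 buf.append('\r')
--                 i += 1
--             count += 1
--         elif c == '\n':
--             buf.append('\n')
--             i += 1
--             count += 1
--         else:
--             buf.append(c)
--             i += 1
--             continue
--         if count == lines_per_chunk:
--             chunks.append(''.join(buf))
--             buf = []
--             count = 0
--     if buf:
--         chunks.append(''.join(buf))
--     return chunks
-- ===== Notes on version B (the rewrite author's own statement) =====
-- stated objective: alternative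
-- what changed: Instead of materialising the splitlines(keepends=True) list and running an enumerate/modulo-flush accumulator loop over it, B scans the characters of the text once, recognising \n / \r / \r\n line breaks itself and cutting a chunk after every lines_per_chunk-th break, with no intermediate list of lines.
import Mathlib
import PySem

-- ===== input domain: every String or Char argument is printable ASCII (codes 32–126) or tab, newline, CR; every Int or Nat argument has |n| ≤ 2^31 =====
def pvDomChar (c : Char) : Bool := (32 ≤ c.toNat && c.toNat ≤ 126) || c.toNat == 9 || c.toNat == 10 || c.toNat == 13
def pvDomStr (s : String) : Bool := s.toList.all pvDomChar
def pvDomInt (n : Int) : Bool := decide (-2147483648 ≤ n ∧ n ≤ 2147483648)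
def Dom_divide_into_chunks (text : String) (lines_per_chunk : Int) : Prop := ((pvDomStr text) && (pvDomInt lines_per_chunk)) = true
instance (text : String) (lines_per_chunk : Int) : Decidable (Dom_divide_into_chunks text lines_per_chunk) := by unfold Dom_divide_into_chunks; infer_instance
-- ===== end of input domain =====

-- B replaces A's splitlines + enumerate/modulo-flush accumulator loop by a single character scan
-- that recognises \n / \r / \r\n breaks itself and cuts a chunk after every k-th break.

-- ===== PORT A =====
-- A-side helper: Python's text.splitlines(keepends=True); exact on Dom's chars (boundaries '\n', '\r', '\r\n')
def pvBreakLine : List Char → (List Char × List Char)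
  | [] => ([], [])
  | c :: rest =>
      if c = '\n' then (['\n'], rest)
      else if c = '\r' then
        match rest with
        | '\n' :: rest' => (['\r', '\n'], rest')
        | _ => (['\r'], rest)
      else (c :: (pvBreakLine rest).1, (pvBreakLine rest).2)

theorem pvBreakLine_len : ∀ cs : List Char, (pvBreakLine cs).2.length + 1 ≤ cs.length ∨ cs = [] := by
  intro cs
  induction cs with
  | nil => right; rfl
  | cons c rest ih =>
    left
    rw [pvBreakLine.eq_def]; dsimp only
    by_cases h1 : c = '\n'
    · simp [h1]
    · rw [if_neg h1]
      by_cases h2 : c = '\r'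
      · rw [if_pos h2]
        split
        · simp_all
        · simp
      · rw [if_neg h2]
        rcases ih with h | h
        · simp; omega
        · subst h; simp [pvBreakLine]

def pvSplitlinesKeep : List Char → List (List Char)
  | [] => []
  | c :: rest => (pvBreakLine (c :: rest)).1 :: pvSplitlinesKeep (pvBreakLine (c :: rest)).2
termination_by cs => cs.length
decreasing_by
  rcases pvBreakLine_len (c :: rest) with h | h
  · simpa using h
  · simp at h

def divide_into_chunks (text : String) (lines_per_chunk : Int) : List String :=
  if text = "" ∨ lines_per_chunk ≤ 0 then (if text = "" then [] else [text])
  else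
    let lines := pvSplitlinesKeep text.toList
    if lines = [] then (if PySem.Str.strip text = "" then [] else [text])
    else
      let st := (PySem.List.enumerate lines).foldl
        (fun (st : List String × List (List Char)) p =>
          if PySem.Int.mod (p.1 + 1) lines_per_chunk = 0
          then (st.1 ++ [String.ofList (PySem.Chars.join [] (st.2 ++ [p.2]))], ([] : List (List Char)))
          else (st.1, st.2 ++ [p.2])) ([], [])
      let chunks := if st.2 = [] then st.1 else st.1 ++ [String.ofList (PySem.Chars.join [] st.2)]
      if chunks = [] ∧ ¬ text = "" then [text] else chunks

-- ===== PORT B =====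
-- B's while loop over character positions, as structural recursion on the remaining characters
-- (remaining chars, count, buf, chunks); Python's `not (i+1 < n and text[i+1] == '\n')` splits into
-- the `[]` and `c2 ≠ '\n'` arms; buf holds the chars of the current chunk ('\r\n' appended as two chars,
-- exactly what ''.join produces from the appended two-char string).
def pvScan (k : Int) : List Char → Int → List Char → List String → List String
  | [], _, buf, chunks => if buf = [] then chunks else chunks ++ [String.ofList buf]
  | c :: rest, count, buf, chunks =>
      if c = '\r' then
        match rest with
        | '\n' :: r =>
            if count + 1 = k then pvScan k r 0 [] (chunks ++ [String.ofList (buf ++ ['\r', '\n'])])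
            else pvScan k r (count + 1) (buf ++ ['\r', '\n']) chunks
        | [] =>
            if count + 1 = k then pvScan k [] 0 [] (chunks ++ [String.ofList (buf ++ ['\r'])])
            else pvScan k [] (count + 1) (buf ++ ['\r']) chunks
        | c2 :: r =>
            if count + 1 = k then pvScan k (c2 :: r) 0 [] (chunks ++ [String.ofList (buf ++ ['\r'])])
            else pvScan k (c2 :: r) (count + 1) (buf ++ ['\r']) chunks
      else if c = '\n' then
        if count + 1 = k then pvScan k rest 0 [] (chunks ++ [String.ofList (buf ++ ['\n'])])
        else pvScan k rest (count + 1) (buf ++ ['\n']) chunks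
      else pvScan k rest count (buf ++ [c]) chunks
termination_by cs => cs.length
decreasing_by all_goals simp

def divide_into_chunks_alt (text : String) (lines_per_chunk : Int) : List String :=
  if text = "" ∨ lines_per_chunk ≤ 0 then (if text = "" then [] else [text])
  else pvScan lines_per_chunk text.toList 0 [] []

-- ===== PRECONDITION & SPEC =====
def Spec_divide_into_chunks (text : String) (lines_per_chunk : Int) (out : List String) : Prop := out = divide_into_chunks_alt text lines_per_chunk
instance (text : String) (lines_per_chunk : Int) (out : List String) : Decidable (Spec_divide_into_chunks text lines_per_chunk out) := by unfold Spec_divide_into_chunks; infer_instance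

-- ===== CLAIM =====
def Claim_equal_divide_into_chunks : Prop := ∀ (text : String) (lines_per_chunk : Int), Dom_divide_into_chunks text lines_per_chunk → Spec_divide_into_chunks text lines_per_chunk (divide_into_chunks text lines_per_chunk)

-- ===== LEMMAS AND PROOFS =====

theorem pvJoin_flatten (a : List (List Char)) : PySem.Chars.join [] a = a.flatten := by
  induction a with
  | nil => rfl
  | cons x xs ih =>
    cases xs with
    | nil => simp [PySem.Chars.join, List.intercalate]
    | cons y ys =>
      simp only [PySem.Chars.join, List.intercalate, List.intersperse, List.flatten] at *
      simpa using ih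

-- A's loop as an explicit recursion (remaining lines, next index, emitted chunks, current buffer), flush included
def pvRun (k : Int) : List (List Char) → Int → List String → List (List Char) → List String
  | [], _, chunks, cur => if cur = [] then chunks else chunks ++ [String.ofList (PySem.Chars.join [] cur)]
  | l :: ls, i, chunks, cur =>
      if PySem.Int.mod (i + 1) k = 0
      then pvRun k ls (i + 1) (chunks ++ [String.ofList (PySem.Chars.join [] (cur ++ [l]))]) []
      else pvRun k ls (i + 1) chunks (cur ++ [l])

theorem pvRun_nil (k : Int) (i : Int) (chunks : List String) (cur : List (List Char)) :
    pvRun k [] i chunks cur = if cur = [] then chunks else chunks ++ [String.ofList (PySem.Chars.join [] cur)] := by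
  rw [pvRun]

theorem pvRun_cons (k : Int) (l : List Char) (ls : List (List Char)) (i : Int) (chunks : List String) (cur : List (List Char)) :
    pvRun k (l :: ls) i chunks cur =
      if PySem.Int.mod (i + 1) k = 0
      then pvRun k ls (i + 1) (chunks ++ [String.ofList (PySem.Chars.join [] (cur ++ [l]))]) []
      else pvRun k ls (i + 1) chunks (cur ++ [l]) := by
  rw [pvRun]

-- the port's foldl over enumerate, with the flush, is pvRun
theorem pvFoldl_run (k : Int) : ∀ (ls : List (List Char)) (i : Int) (chunks : List String) (cur : List (List Char)),
    (if ((PySem.List.enumerate ls i).foldl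
        (fun (st : List String × List (List Char)) p =>
          if PySem.Int.mod (p.1 + 1) k = 0
          then (st.1 ++ [String.ofList (PySem.Chars.join [] (st.2 ++ [p.2]))], ([] : List (List Char)))
          else (st.1, st.2 ++ [p.2])) (chunks, cur)).2 = []
     then ((PySem.List.enumerate ls i).foldl
        (fun (st : List String × List (List Char)) p =>
          if PySem.Int.mod (p.1 + 1) k = 0
          then (st.1 ++ [String.ofList (PySem.Chars.join [] (st.2 ++ [p.2]))], ([] : List (List Char)))
          else (st.1, st.2 ++ [p.2])) (chunks, cur)).1
     else ((PySem.List.enumerate ls i).foldl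
        (fun (st : List String × List (List Char)) p =>
          if PySem.Int.mod (p.1 + 1) k = 0
          then (st.1 ++ [String.ofList (PySem.Chars.join [] (st.2 ++ [p.2]))], ([] : List (List Char)))
          else (st.1, st.2 ++ [p.2])) (chunks, cur)).1 ++
          [String.ofList (PySem.Chars.join [] (((PySem.List.enumerate ls i).foldl
        (fun (st : List String × List (List Char)) p =>
          if PySem.Int.mod (p.1 + 1) k = 0
          then (st.1 ++ [String.ofList (PySem.Chars.join [] (st.2 ++ [p.2]))], ([] : List (List Char)))
          else (st.1, st.2 ++ [p.2])) (chunks, cur)).2))])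
    = pvRun k ls i chunks cur := by
  intro ls
  induction ls with
  | nil => intro i chunks cur; rw [pvRun_nil]; simp [PySem.List.enumerate_nil]
  | cons l tl ih =>
    intro i chunks cur
    rw [PySem.List.enumerate_cons, List.foldl_cons, pvRun_cons]
    by_cases h : PySem.Int.mod (i + 1) k = 0
    · rw [if_pos h]
      have := ih (i + 1) (chunks ++ [String.ofList (PySem.Chars.join [] (cur ++ [l]))]) []
      simpa [h] using this
    · rw [if_neg h]
      have := ih (i + 1) chunks (cur ++ [l])
      simpa [h] using this

-- B's scan grouped by whole lines: the same chunking with the counter reset at each flush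
def pvLineRun (k : Int) : List (List Char) → Int → List Char → List String → List String
  | [], _, buf, chunks => if buf = [] then chunks else chunks ++ [String.ofList buf]
  | l :: ls, count, buf, chunks =>
      if count + 1 = k then pvLineRun k ls 0 [] (chunks ++ [String.ofList (buf ++ l)])
      else pvLineRun k ls (count + 1) (buf ++ l) chunks

theorem pvLineRun_nil (k : Int) (count : Int) (buf : List Char) (chunks : List String) :
    pvLineRun k [] count buf chunks = if buf = [] then chunks else chunks ++ [String.ofList buf] := by
  rw [pvLineRun]

theorem pvLineRun_cons (k : Int) (l : List Char) (ls : List (List Char)) (count : Int) (buf : List Char) (chunks : List String) :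
    pvLineRun k (l :: ls) count buf chunks =
      if count + 1 = k then pvLineRun k ls 0 [] (chunks ++ [String.ofList (buf ++ l)])
      else pvLineRun k ls (count + 1) (buf ++ l) chunks := by
  rw [pvLineRun]

-- pvRun with its modulo counter equals pvLineRun with the reset counter (lines all nonempty)
theorem pvRun_lineRun (k : Int) (hk : 0 < k) : ∀ (ls : List (List Char)) (i : Int) (chunks : List String) (cur : List (List Char)),
    0 ≤ i → i % k = (cur.length : Int) → cur.length < k.toNat →
    (∀ l ∈ ls, l ≠ []) → (∀ l ∈ cur, l ≠ []) →
    pvRun k ls i chunks cur = pvLineRun k ls (cur.length : Int) cur.flatten chunks := by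
  intro ls
  induction ls with
  | nil =>
    intro i chunks cur _ _ _ _ hcur
    rw [pvRun_nil, pvLineRun_nil, pvJoin_flatten]
    by_cases hc : cur = []
    · subst hc; simp
    · rw [if_neg hc]
      have hf : cur.flatten ≠ [] := by
        simp only [ne_eq, List.flatten_eq_nil_iff]
        intro hall
        rcases cur with _ | ⟨x, xs⟩
        · exact hc rfl
        · exact hcur x (by simp) (hall x (by simp))
      rw [if_neg hf]
  | cons l tl ih =>
    intro i chunks cur hi hmod hlt hls hcur
    have hq : i = k * (i / k) + (cur.length : Int) := by
      conv_lhs => rw [← Int.ediv_add_emod i k]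
      rw [hmod]
    have hstep : (i + 1) % k = ((cur.length : Int) + 1) % k := by
      conv_lhs => rw [hq]
      have : k * (i / k) + ↑cur.length + 1 = (↑cur.length + 1) + (i / k) * k := by ring
      rw [this, Int.add_mul_emod_self_right]
    rw [pvRun_cons, pvLineRun_cons, PySem.Int.mod_eq_emod_of_pos hk, hstep]
    by_cases hc : (cur.length : Int) + 1 = k
    · have hfull : ((cur.length : Int) + 1) % k = 0 := by rw [hc, Int.emod_self]
      rw [if_pos hfull, if_pos hc]
      rw [ih (i + 1) _ [] (by omega) (by rw [hstep, hfull]; simp) (by simp; omega)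
          (fun x hx => hls x (by simp [hx])) (by simp)]
      rw [pvJoin_flatten]
      simp
    · have hne : ((cur.length : Int) + 1) % k ≠ 0 := by
        rw [Int.emod_eq_of_lt (by omega) (by omega)]
        omega
      rw [if_neg hne, if_neg hc]
      rw [ih (i + 1) chunks (cur ++ [l]) (by omega)
          (by rw [hstep, Int.emod_eq_of_lt (by omega) (by omega)]; simp) (by simp; omega)
          (fun x hx => hls x (by simp [hx]))
          (by intro x hx; rcases List.mem_append.mp hx with h | h
              · exact hcur x h
              · simp at h; subst h; exact hls x (by simp))]
      simp

theorem pvSplitlines_nil : pvSplitlinesKeep [] = [] := by rw [pvSplitlinesKeep]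

theorem pvSplitlines_cons (c : Char) (cs : List Char) :
    pvSplitlinesKeep (c :: cs) = (pvBreakLine (c :: cs)).1 :: pvSplitlinesKeep (pvBreakLine (c :: cs)).2 := by
  rw [pvSplitlinesKeep]

-- pushing one non-break character into the buffer
theorem pvLineRun_shift (k : Int) (c : Char) (l1 : List Char) (ls : List (List Char)) (count : Int) (buf : List Char) (chunks : List String) :
    pvLineRun k ((c :: l1) :: ls) count buf chunks = pvLineRun k (l1 :: ls) count (buf ++ [c]) chunks := by
  rw [pvLineRun_cons, pvLineRun_cons]
  by_cases h : count + 1 = k <;> simp [h]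

-- reduction lemmas for pvBreakLine on each break shape
theorem pvBreakLine_lf (rest : List Char) : pvBreakLine ('\n' :: rest) = (['\n'], rest) := by
  rw [pvBreakLine.eq_def]; simp

theorem pvBreakLine_crlf (r : List Char) : pvBreakLine ('\r' :: '\n' :: r) = (['\r', '\n'], r) := by
  rw [pvBreakLine.eq_def]; simp

theorem pvBreakLine_cr_nil : pvBreakLine ['\r'] = (['\r'], []) := by
  rw [pvBreakLine.eq_def]; simp

theorem pvBreakLine_cr (c2 : Char) (r : List Char) (h : c2 ≠ '\n') :
    pvBreakLine ('\r' :: c2 :: r) = (['\r'], c2 :: r) := by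
  rw [pvBreakLine.eq_def]; simp only [Char.reduceEq, reduceIte]
  split
  · simp_all
  · rfl

theorem pvBreakLine_other (c : Char) (rest : List Char) (h1 : c ≠ '\n') (h2 : c ≠ '\r') :
    pvBreakLine (c :: rest) = (c :: (pvBreakLine rest).1, (pvBreakLine rest).2) := by
  rw [pvBreakLine.eq_def]; simp [h1, h2]

-- B's character scan equals pvLineRun over splitlines(keepends=True)
theorem pvScan_lineRun (k : Int) : ∀ (cs : List Char) (count : Int) (buf : List Char) (chunks : List String),
    pvScan k cs count buf chunks = pvLineRun k (pvSplitlinesKeep cs) count buf chunks := by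
  intro cs count buf chunks
  induction cs, count, buf, chunks using pvScan.induct (k := k) with
  | case1 x chunks => rw [pvScan, pvSplitlines_nil, pvLineRun_nil]
  | case2 x buf chunks hb => rw [pvScan, pvSplitlines_nil, pvLineRun_nil]
  | case3 count buf chunks r h ih =>
    rw [pvScan, pvSplitlines_cons, pvBreakLine_crlf, ih, pvLineRun_cons]
    simp [h]
  | case4 count buf chunks r h ih =>
    rw [pvScan, pvSplitlines_cons, pvBreakLine_crlf, ih, pvLineRun_cons]
    simp [h]
  | case5 count buf chunks h ih =>
    rw [pvScan, pvSplitlines_cons, pvBreakLine_cr_nil, ih, pvLineRun_cons]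
    simp [h]
  | case6 count buf chunks h ih =>
    rw [pvScan, pvSplitlines_cons, pvBreakLine_cr_nil, ih, pvLineRun_cons]
    simp [h]
  | case7 count buf chunks c2 r hc2 h ih =>
    rw [pvScan, pvSplitlines_cons, pvBreakLine_cr c2 r (fun he => hc2 he), ih, pvLineRun_cons]
    · simp [h]
    · exact hc2
  | case8 count buf chunks c2 r hc2 h ih =>
    rw [pvScan, pvSplitlines_cons, pvBreakLine_cr c2 r (fun he => hc2 he), ih, pvLineRun_cons]
    · simp [h]
    · exact hc2
  | case9 rest count buf chunks h _ ih =>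
    rw [pvScan.eq_def]
    simp only [Char.reduceEq, reduceIte]
    rw [pvSplitlines_cons, pvBreakLine_lf, ih, pvLineRun_cons]
    simp [h]
  | case10 rest count buf chunks h _ ih =>
    rw [pvScan.eq_def]
    simp only [Char.reduceEq, reduceIte]
    rw [pvSplitlines_cons, pvBreakLine_lf, ih, pvLineRun_cons]
    simp [h]
  | case11 c rest count buf chunks hr hn ih =>
    rw [pvScan.eq_def]
    simp only [if_neg hr, if_neg hn]
    rw [pvSplitlines_cons, pvBreakLine_other c rest hn hr, ih]
    cases rest with
    | nil =>
      rw [pvBreakLine.eq_def]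
      simp only [pvSplitlines_nil]
      rw [pvLineRun_cons]
      by_cases hk1 : count + 1 = k <;> simp [hk1, pvLineRun_nil]
    | cons d ds =>
      rw [pvSplitlines_cons, pvLineRun_shift]

-- every line from splitlines(keepends=True) is nonempty
theorem pvBreakLine_fst_ne_nil (c : Char) (cs : List Char) : (pvBreakLine (c :: cs)).1 ≠ [] := by
  rw [pvBreakLine.eq_def]; dsimp only
  by_cases h1 : c = '\n'
  · simp [h1]
  · rw [if_neg h1]
    by_cases h2 : c = '\r'
    · rw [if_pos h2]; split <;> simp
    · rw [if_neg h2]; simp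

theorem pvSplitlines_mem_ne_nil : ∀ (cs : List Char), ∀ l ∈ pvSplitlinesKeep cs, l ≠ [] := by
  intro cs
  induction cs using pvSplitlinesKeep.induct with
  | case1 => rw [pvSplitlines_nil]; simp
  | case2 c rest ih =>
    rw [pvSplitlines_cons]
    intro l hl
    rcases List.mem_cons.mp hl with h | h
    · subst h; exact pvBreakLine_fst_ne_nil c rest
    · exact ih l h

-- pvLineRun never returns [] once it holds a line or a chunk
theorem pvLineRun_ne_nil (k : Int) : ∀ (ls : List (List Char)) (count : Int) (buf : List Char) (chunks : List String),
    (∀ l ∈ ls, l ≠ []) → (chunks ≠ [] ∨ buf ≠ [] ∨ ls ≠ []) → pvLineRun k ls count buf chunks ≠ [] := by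
  intro ls
  induction ls with
  | nil =>
    intro count buf chunks _ h
    rw [pvLineRun_nil]
    by_cases hb : buf = []
    · rcases h with h | h | h
      · simpa [hb] using h
      · exact absurd hb h
      · exact absurd rfl h
    · simp [hb]
  | cons l tl ih =>
    intro count buf chunks hls h
    rw [pvLineRun_cons]
    by_cases hk1 : count + 1 = k
    · rw [if_pos hk1]
      exact ih 0 [] _ (fun x hx => hls x (by simp [hx])) (Or.inl (by simp))
    · rw [if_neg hk1]
      refine ih (count + 1) (buf ++ l) chunks (fun x hx => hls x (by simp [hx])) (Or.inr (Or.inl ?_))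
      have : l ≠ [] := hls l (by simp)
      simp [this]

-- ===== VERDICT =====
theorem divide_into_chunks_spec : Claim_equal_divide_into_chunks := by
  intro text lpc _dom
  unfold Spec_divide_into_chunks divide_into_chunks divide_into_chunks_alt
  by_cases hg : text = "" ∨ lpc ≤ 0
  · simp [hg]
  · rw [if_neg hg, if_neg hg]
    push_neg at hg
    obtain ⟨ht, hk0⟩ := hg
    have hk : 0 < lpc := by omega
    have htl : text.toList ≠ [] := by
      intro h
      apply ht
      have h2 := congrArg String.ofList h
      rwa [String.ofList_toList] at h2
    obtain ⟨c, cs, hcs⟩ : ∃ c cs, text.toList = c :: cs := by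
      cases h : text.toList with
      | nil => exact absurd h htl
      | cons c cs => exact ⟨c, cs, rfl⟩
    obtain ⟨a, as, hla⟩ : ∃ a as, pvSplitlinesKeep text.toList = a :: as := by
      rw [hcs, pvSplitlines_cons]
      exact ⟨_, _, rfl⟩
    have hmem : ∀ l ∈ pvSplitlinesKeep text.toList, l ≠ [] := pvSplitlines_mem_ne_nil text.toList
    simp only [hla]
    rw [if_neg (by simp : ¬(a :: as = []))]
    rw [pvFoldl_run lpc (a :: as) 0 [] []]
    rw [pvRun_lineRun lpc hk (a :: as) 0 [] [] le_rfl (by simp) (by simp; omega)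
        (by rw [← hla]; exact hmem) (by simp)]
    simp only [List.length_nil, Nat.cast_zero, List.flatten_nil]
    rw [if_neg]
    · rw [pvScan_lineRun, hla]
    · intro hcon
      exact pvLineRun_ne_nil lpc (a :: as) 0 [] [] (by rw [← hla]; exact hmem)
        (Or.inr (Or.inr (by simp))) hcon.1
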